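-- pv_equiv track=rewrite | github.com/microsoft/BioGPT | examples/RE-BC5CDR/rebuild_data.py | unify_ent2id
-- ===== SOURCE A (Python) =====
-- def unify_ent2id(ent2id, method='max'):
--     id2ent = {}
--     for k, v in ent2id.items():
--         if v in id2ent:
--             if method == 'min':
--                 id2ent[v] = k if len(k) < len(id2ent[v]) else id2ent[v]
--             else:
--                 id2ent[v] = k if len(k) > len(id2ent[v]) else id2ent[v]
--         else:
--             id2ent[v] = k
--     ent2id = {v:k for k, v in id2ent.items()}
--     return ent2id, id2ent
-- ===== SOURCE B (Python) =====
-- def unify_ent2id(ent2id, method='max'):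
--     groups = {}
--     for k, v in ent2id.items():
--         groups.setdefault(v, []).append(k)
--     pick = min if method == 'min' else max
--     id2ent = {v: pick(ks, key=len) for v, ks in groups.items()}
--     ent2id = {v: k for k, v in id2ent.items()}
--     return ent2id, id2ent
-- ===== Notes on version B (the rewrite author's own statement) =====
-- stated objective: simpler
-- what changed: Replaces A's fused per-item compare-and-overwrite fold with a group-by-id pass followed by a min/max-by-length reduction per group and a final inversion comprehension.
import Mathlib
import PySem

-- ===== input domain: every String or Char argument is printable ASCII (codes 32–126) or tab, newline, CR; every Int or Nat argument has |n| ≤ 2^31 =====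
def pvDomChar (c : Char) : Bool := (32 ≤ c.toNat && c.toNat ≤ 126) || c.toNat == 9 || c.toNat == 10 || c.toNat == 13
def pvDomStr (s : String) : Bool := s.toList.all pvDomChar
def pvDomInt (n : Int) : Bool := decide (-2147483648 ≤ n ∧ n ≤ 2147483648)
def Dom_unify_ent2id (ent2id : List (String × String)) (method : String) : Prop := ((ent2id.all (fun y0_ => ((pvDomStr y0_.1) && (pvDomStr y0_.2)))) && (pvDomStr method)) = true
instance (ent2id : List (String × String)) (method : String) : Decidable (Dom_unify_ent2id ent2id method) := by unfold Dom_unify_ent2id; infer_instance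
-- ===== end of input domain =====

-- B replaces A's fused per-item compare-and-overwrite loop by group-by-id then a min/max-by-length reduction per group (objective: simpler decomposition, same cost).


-- ===== PORT A =====
-- A's loop body: overwrite id2ent[v] with the longer (or, for 'min', shorter) key, keeping the old one on ties.
def pvStepA (method : String) (d : PySem.Dict String String) (kv : String × String) : PySem.Dict String String :=
  if d.contains kv.2 then
    if method == "min" then
      d.insert kv.2 (if PySem.Str.len kv.1 < PySem.Str.len (d.getD kv.2 "") then kv.1 else d.getD kv.2 "")
    else
      d.insert kv.2 (if PySem.Str.len kv.1 > PySem.Str.len (d.getD kv.2 "") then kv.1 else d.getD kv.2 "")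
  else d.insert kv.2 kv.1

def unify_ent2id (ent2id : List (String × String)) (method : String) : (List (String × String)) × (List (String × String)) :=
  let id2ent := ent2id.foldl (pvStepA method) PySem.Dict.empty
  let ent2id' := PySem.Dict.ofList (id2ent.items.map (fun p => (p.2, p.1)))
  (ent2id'.items, id2ent.items)

-- ===== PORT B =====
-- min(ks, key=len) / max(ks, key=len); groups are never empty, so the default is never used.
def pvPickRep (method : String) (ks : List String) : String :=
  (if method == "min" then PySem.List.min? ks PySem.Str.len else PySem.List.max? ks PySem.Str.len).getD ""

def unify_ent2id_alt (ent2id : List (String × String)) (method : String) : (List (String × String)) × (List (String × String)) :=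
  let groups := ent2id.foldl (fun d kv => d.modify kv.2 [] (fun ks => ks ++ [kv.1])) PySem.Dict.empty
  let id2ent := PySem.Dict.ofList (groups.items.map (fun p => (p.1, pvPickRep method p.2)))
  let ent2id' := PySem.Dict.ofList (id2ent.items.map (fun p => (p.2, p.1)))
  (ent2id'.items, id2ent.items)

-- ===== PRECONDITION & SPEC =====
def Spec_unify_ent2id (ent2id : List (String × String)) (method : String) (out : (List (String × String)) × (List (String × String))) : Prop := out = unify_ent2id_alt ent2id method
instance (ent2id : List (String × String)) (method : String) (out : (List (String × String)) × (List (String × String))) : Decidable (Spec_unify_ent2id ent2id method out) := by unfold Spec_unify_ent2id; infer_instance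

-- ===== CLAIM (what is proved, stated in full; the proofs are below) =====
def Claim_equal_unify_ent2id : Prop := ∀ (ent2id : List (String × String)) (method : String), Dom_unify_ent2id ent2id method → Spec_unify_ent2id ent2id method (unify_ent2id ent2id method)

-- ===== LEMMAS AND PROOFS =====

-- A's step as a single insert (value level), for the keys lemmas
def pvFVal (method : String) (d : PySem.Dict String String) (kv : String × String) : String :=
  if d.contains kv.2 then
    if method == "min" then
      (if PySem.Str.len kv.1 < PySem.Str.len (d.getD kv.2 "") then kv.1 else d.getD kv.2 "")
    else
      (if PySem.Str.len kv.1 > PySem.Str.len (d.getD kv.2 "") then kv.1 else d.getD kv.2 "")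
  else kv.1

-- value-level version of A's step
def pvAVal (method : String) (o : Option String) (k : String) : Option String :=
  match o with
  | none => some k
  | some b =>
    if method == "min" then some (if PySem.Str.len k < PySem.Str.len b then k else b)
    else some (if PySem.Str.len k > PySem.Str.len b then k else b)

theorem pvStepA_get? (method : String) (d : PySem.Dict String String) (kv : String × String) (v : String) :
    (pvStepA method d kv).get? v = if v = kv.2 then pvAVal method (d.get? kv.2) kv.1 else d.get? v := by
  unfold pvStepA pvAVal
  rw [PySem.Dict.contains_eq_isSome_get?]
  cases h : d.get? kv.2 with
  | none =>
    simp only [Option.isSome_none, Bool.false_eq_true, if_false, PySem.Dict.get?_insert]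
  | some b =>
    have hg : d.getD kv.2 "" = b := PySem.Dict.getD_of_get?_eq_some d "" h
    simp only [Option.isSome_some, if_true, hg]
    split_ifs <;> simp [PySem.Dict.get?_insert, *]

theorem foldA_get? (method : String) (l : List (String × String)) (d : PySem.Dict String String) (v : String) :
    (l.foldl (pvStepA method) d).get? v =
      ((l.filter (fun p => p.2 == v)).map (fun p => p.1)).foldl (pvAVal method) (d.get? v) := by
  induction l generalizing d with
  | nil => rfl
  | cons p t ih =>
    rw [List.foldl_cons, ih, pvStepA_get?]
    by_cases hv : p.2 = v
    · subst hv
      simp only [List.filter_cons, beq_self_eq_true, if_true, List.map_cons, List.foldl_cons]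
    · have hb : (p.2 == v) = false := beq_eq_false_iff_ne.mpr hv
      have hv' : v ≠ p.2 := fun h => hv h.symm
      simp only [List.filter_cons, hb, Bool.false_eq_true, if_false, if_neg hv']

theorem pick_eq_fold (method : String) (ks : List String) :
    (if method == "min" then PySem.List.min? ks PySem.Str.len else PySem.List.max? ks PySem.Str.len) =
      ks.foldl (pvAVal method) none := by
  by_cases h : (method == "min") = true
  · rw [if_pos h]
    unfold PySem.List.min?
    congr 1
    funext o k
    cases o with
    | none => rfl
    | some b =>
      simp only [pvAVal, h, if_true]
      split_ifs <;> rfl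
  · rw [if_neg h]
    unfold PySem.List.max?
    congr 1
    funext o k
    cases o with
    | none => rfl
    | some b =>
      simp only [pvAVal, h, Bool.false_eq_true, if_false]
      split_ifs <;> rfl

theorem idents_eq (ent2id : List (String × String)) (method : String) :
    (ent2id.foldl (pvStepA method) PySem.Dict.empty).items =
      (PySem.Dict.ofList
        ((ent2id.foldl (fun d kv => d.modify kv.2 [] (fun ks => ks ++ [kv.1])) PySem.Dict.empty).items.map
          (fun p => (p.1, pvPickRep method p.2)))).items := by
  set dA := ent2id.foldl (pvStepA method) PySem.Dict.empty with hdA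
  set G := ent2id.foldl (fun d kv => d.modify kv.2 [] (fun ks => ks ++ [kv.1])) PySem.Dict.empty with hG
  -- A's step in insert form, to apply the keys lemmas
  have hstep : pvStepA method = (fun d kv => d.insert kv.2 (pvFVal method d kv)) := by
    funext d kv
    unfold pvStepA pvFVal
    split_ifs <;> rfl
  have hkA : dA.keys = PySem.Set.ofList (ent2id.map (fun p => p.2)) := by
    rw [hdA, hstep, PySem.Dict.keys_foldl_insert_key ent2id (fun p => p.2) (pvFVal method),
      PySem.Dict.keys_empty, PySem.Set.update_nil_left]
  have hkG : G.keys = PySem.Set.ofList (ent2id.map (fun p => p.2)) := by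
    rw [hG, PySem.Dict.keys_foldl_modify_key ent2id (fun p => p.2) [] (fun _ kv ks => ks ++ [kv.1]),
      PySem.Dict.keys_empty, PySem.Set.update_nil_left]
  have hndA : dA.keys.Nodup := by
    rw [hdA, hstep]
    exact PySem.Dict.nodup_keys_foldl_insert_key ent2id _ _ _ (by simp [PySem.Dict.keys_empty])
  have hndG : G.keys.Nodup := by
    rw [hG]
    exact PySem.Dict.nodup_keys_foldl_modify_key ent2id _ _ _ _ (by simp [PySem.Dict.keys_empty])
  -- the group of id v
  have hgd : ∀ v, G.getD v [] = (ent2id.filter (fun p => p.2 == v)).map (fun p => p.1) := by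
    intro v
    have hswap : G = (ent2id.map (fun kv => (kv.2, kv.1))).foldl
        (fun d p => d.modify p.1 [] (fun ks => ks ++ [p.2])) PySem.Dict.empty := by
      rw [hG, List.foldl_map]
    rw [hswap, PySem.Dict.getD_foldl_modify_append, PySem.Dict.getD_empty, List.nil_append,
      List.filter_map, List.map_map]
    rfl
  -- A's surviving value for id v is exactly B's representative of its group
  have hval : ∀ v, dA.getD v "" = pvPickRep method ((ent2id.filter (fun p => p.2 == v)).map (fun p => p.1)) := by
    intro v
    rw [PySem.Dict.getD_eq_get?_getD, hdA, foldA_get?, PySem.Dict.get?_empty]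
    unfold pvPickRep
    rw [pick_eq_fold]
  -- B's id2ent dict lists exactly the mapped items of G
  have hofl : (PySem.Dict.ofList (G.items.map (fun p => (p.1, pvPickRep method p.2)))).items
      = G.items.map (fun p => (p.1, pvPickRep method p.2)) := by
    show (List.foldl (fun acc p => acc.insert p.1 p.2) PySem.Dict.empty
        (G.items.map (fun p => (p.1, pvPickRep method p.2)))).items = _
    rw [List.foldl_map]
    have := PySem.Dict.items_foldl_insert_fresh G.items
      (fun p => p.1) (fun p => pvPickRep method p.2) PySem.Dict.empty
      (fun _ _ => PySem.Dict.contains_empty _) (by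
        have : G.items.map (fun p : String × List String => p.1) = G.keys := rfl
        rw [this]; exact hndG)
    simpa using this
  rw [hofl, PySem.Dict.items_eq_map_keys dA hndA "", PySem.Dict.items_eq_map_keys G hndG [],
    List.map_map, hkA, hkG]
  refine List.map_congr_left (fun v _ => ?_)
  simp only [Function.comp]
  rw [hval, hgd]

theorem unify_ent2id_spec' : ∀ (ent2id : List (String × String)) (method : String),
    unify_ent2id ent2id method = unify_ent2id_alt ent2id method := by
  intro l m
  simp only [unify_ent2id, unify_ent2id_alt]
  rw [idents_eq l m]

-- ===== VERDICT (by name: the statement is the Claim_ definition above) =====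
theorem unify_ent2id_spec : Claim_equal_unify_ent2id := by
  intro l m _
  exact unify_ent2id_spec' l m
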